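-- pv_equiv track=rewrite | github.com/ryan-gang/Competitive-Programming | Leetcode/Maximum_Enemy_Forts_That_Can_Be_Captured.py | captureFortsSelf
-- ===== SOURCE A (Python) =====
-- from typing import List
--
-- def captureFortsSelf(forts: List[int]) -> int:
--     """
--     Takes 1 forward, and 1 backward pass over the array, counting the number of 0's
--     between 1's and -1's.
--     """
--     n = len(forts)
--     max_captured = 0
--     captured = 0
--     flag = False
--     for i in range(n):
--         if forts[i] == 1:
--             captured = 0
--             flag = True
--             continue
--         elif forts[i] == -1:
--             flag = False
--             max_captured = max(captured, max_captured)
--             captured = 0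
--         if flag:
--             captured += 1
--
--     flag = False
--     captured = 0
--     for i in range(n - 1, -1, -1):
--         if forts[i] == 1:
--             captured = 0
--             flag = True
--             continue
--         elif forts[i] == -1:
--             flag = False
--             max_captured = max(captured, max_captured)
--             captured = 0
--         if flag:
--             captured += 1
--
--     return max_captured if max_captured > 0 else 0
-- ===== SOURCE B (Python) =====
-- from typing import List
--
-- def captureFortsSelf(forts: List[int]) -> int:
--     # One pass to collect (index, value) of every fort (1 or -1); then one pass
--     # over adjacent fort pairs: opposite signs capture j - i - 1 cells.
--     marks = [(i, v) for i, v in enumerate(forts) if v in (1, -1)]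
--     best = 0
--     for (i, u), (j, w) in zip(marks, marks[1:]):
--         if u == -w:
--             best = max(best, j - i - 1)
--     return best
-- ===== Notes on version B (the rewrite author's own statement) =====
-- stated objective: simpler
-- what changed: Replaces A's two stateful directional counting scans (forward and backward, with flag/captured/max state) by collecting the (index, value) positions of all forts once and taking the maximum of j - i - 1 over adjacent opposite-sign fort pairs.
import Mathlib
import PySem

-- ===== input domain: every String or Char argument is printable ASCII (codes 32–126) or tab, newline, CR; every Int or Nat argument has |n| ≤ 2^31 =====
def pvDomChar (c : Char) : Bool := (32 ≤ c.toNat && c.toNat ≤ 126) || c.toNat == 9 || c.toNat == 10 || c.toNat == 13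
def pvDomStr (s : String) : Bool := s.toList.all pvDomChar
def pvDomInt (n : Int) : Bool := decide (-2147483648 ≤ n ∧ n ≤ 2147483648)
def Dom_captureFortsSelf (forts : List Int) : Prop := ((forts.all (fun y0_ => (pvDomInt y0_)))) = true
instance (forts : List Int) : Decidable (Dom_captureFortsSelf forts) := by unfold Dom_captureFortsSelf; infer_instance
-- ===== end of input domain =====

-- B replaces A's two stateful directional counting scans by one pass collecting
-- (index, value) of the forts and one pass over adjacent opposite-sign pairs (objective: simpler).

-- ===== PORT A =====
-- one iteration of A's loop body (identical in both of A's passes)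
def stepA (s : Int × Int × Bool) (v : Int) : Int × Int × Bool :=
  if v = 1 then (s.1, 0, true)
  else if v = -1 then (max s.2.1 s.1, 0, false)
  else if s.2.2 then (s.1, s.2.1 + 1, s.2.2) else s

-- first loop reads forts[i] for i = 0..n-1 (a left fold over forts), second loop
-- reads forts[i] for i = n-1..0 (a left fold over forts.reverse)
def captureFortsSelf (forts : List Int) : Int :=
  let s1 := forts.foldl stepA (0, 0, false)
  let s2 := forts.reverse.foldl stepA (s1.1, 0, false)
  if s2.1 > 0 then s2.1 else 0

-- ===== PORT B =====
def captureFortsSelf_alt (forts : List Int) : Int :=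
  let marks := (PySem.List.enumerate forts 0).filter (fun p => p.2 == 1 || p.2 == -1)
  (marks.zip (marks.drop 1)).foldl
    (fun b q => if q.1.2 = -q.2.2 then max b (q.2.1 - q.1.1 - 1) else b) 0

-- ===== PRECONDITION & SPEC =====
def Spec_captureFortsSelf (forts : List Int) (out : Int) : Prop := out = captureFortsSelf_alt forts
instance (forts : List Int) (out : Int) : Decidable (Spec_captureFortsSelf forts out) := by unfold Spec_captureFortsSelf; infer_instance

-- ===== CLAIM (what is proved, stated in full; the proofs are below) =====
def Claim_equal_captureFortsSelf : Prop := ∀ (forts : List Int), Dom_captureFortsSelf forts → Spec_captureFortsSelf forts (captureFortsSelf forts)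

-- ===== LEMMAS AND PROOFS =====

-- the (index, value) list of the fort cells of xs, indices starting at i
def marksAux (i : Int) : List Int → List (Int × Int)
  | [] => []
  | v :: t => if v = 1 ∨ v = -1 then (i, v) :: marksAux (i + 1) t else marksAux (i + 1) t

-- gaps of adjacent opposite-sign mark pairs, tagged with the value of the RIGHT mark;
-- (j, w) is the mark preceding ms
def pairsOf (j w : Int) : List (Int × Int) → List (Int × Int)
  | [] => []
  | (k, h) :: t => (if w = -h then [(k - j - 1, h)] else []) ++ pairsOf k h t

def pairsStart : List (Int × Int) → List (Int × Int)
  | [] => []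
  | (k, h) :: t => pairsOf k h t

-- the gaps whose right-mark value is d
def gapsD (d : Int) (P : List (Int × Int)) : List Int :=
  (P.filter (fun p => p.2 == d)).map Prod.fst

def leadOf (i : Int) : List (Int × Int) → Int
  | [] => 0
  | (k, w) :: _ => if w = 1 then k - i else 0

def flagOf : List (Int × Int) → Bool
  | [] => false
  | (_, w) :: _ => decide (w = 1)

lemma stepA_one (s : Int × Int × Bool) : stepA s 1 = (s.1, 0, true) := by simp [stepA]

lemma stepA_negone (s : Int × Int × Bool) : stepA s (-1) = (max s.2.1 s.1, 0, false) := by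
  norm_num [stepA]

lemma stepA_other (s : Int × Int × Bool) (v : Int) (h1 : v ≠ 1) (h2 : v ≠ -1) :
    stepA s v = if s.2.2 then (s.1, s.2.1 + 1, s.2.2) else s := by simp [stepA, h1, h2]

lemma marksAux_cons_marker (i v : Int) (t : List Int) (h : v = 1 ∨ v = -1) :
    marksAux i (v :: t) = (i, v) :: marksAux (i + 1) t := by simp [marksAux, h]

lemma marksAux_cons_other (i v : Int) (t : List Int) (h : ¬ (v = 1 ∨ v = -1)) :
    marksAux i (v :: t) = marksAux (i + 1) t := by simp [marksAux, h]

lemma pairsOf_cons (j w k h : Int) (t : List (Int × Int)) :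
    pairsOf j w ((k, h) :: t) = (if w = -h then [(k - j - 1, h)] else []) ++ pairsOf k h t := rfl

lemma gapsD_cons (d g e : Int) (P : List (Int × Int)) :
    gapsD d ((g, e) :: P) = (if e = d then [g] else []) ++ gapsD d P := by
  by_cases he : e = d <;> simp [gapsD, List.filter_cons, he]

lemma enum_filter_eq_marksAux (xs : List Int) : ∀ i : Int,
    (PySem.List.enumerate xs i).filter (fun p => p.2 == 1 || p.2 == -1) = marksAux i xs := by
  induction xs with
  | nil => intro i; simp [PySem.List.enumerate_nil, marksAux]
  | cons v t ih =>
      intro i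
      simp only [PySem.List.enumerate_cons, List.filter_cons]
      by_cases h : v = 1 ∨ v = -1
      · rw [marksAux_cons_marker i v t h]
        rcases h with h | h <;> simp [h, ih]
      · rw [marksAux_cons_other i v t h]
        push_neg at h
        simp [h.1, h.2, ih]

lemma marksAux_mem (xs : List Int) : ∀ i : Int, ∀ p ∈ marksAux i xs, p.2 = 1 ∨ p.2 = -1 := by
  induction xs with
  | nil => intro i p hp; simp [marksAux] at hp
  | cons v t ih =>
      intro i p hp
      by_cases h : v = 1 ∨ v = -1
      · rw [marksAux_cons_marker i v t h] at hp
        rcases List.mem_cons.1 hp with h' | h'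
        · subst h'; exact h
        · exact ih _ _ h'
      · rw [marksAux_cons_other i v t h] at hp
        exact ih _ _ hp

lemma pairsOf_mem (ms : List (Int × Int)) : ∀ j w : Int, ∀ q ∈ pairsOf j w ms,
    ∃ p ∈ ms, q.2 = p.2 := by
  induction ms with
  | nil => intro j w q hq; simp [pairsOf] at hq
  | cons p t ih =>
      intro j w q hq
      obtain ⟨k, h⟩ := p
      rw [pairsOf_cons] at hq
      rcases List.mem_append.1 hq with hq | hq
      · by_cases hw : w = -h
        · simp [hw] at hq; subst hq; exact ⟨(k, h), List.mem_cons_self, rfl⟩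
        · simp [hw] at hq
      · obtain ⟨p', hp', hp2⟩ := ih k h q hq
        exact ⟨p', List.mem_cons_of_mem _ hp', hp2⟩

-- merging an extra element into the seed of a running max, from either side
lemma foldl_max_swap (L : List Int) : ∀ a b : Int, max (L.foldl max a) b = L.foldl max (max a b) := by
  induction L with
  | nil => intro a b; rfl
  | cons x t ih =>
      intro a b
      simp only [List.foldl_cons]
      rw [ih, max_right_comm a b x]

lemma foldl_max_pull (L : List Int) : ∀ a g : Int, L.foldl max (max a g) = max g (L.foldl max a) := by
  induction L with
  | nil => intro a g; simp [max_comm]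
  | cons x t ih =>
      intro a g
      simp only [List.foldl_cons]
      rw [max_right_comm a g x, ih]

-- A's forward pass, with a previous mark (j, w) already seen
lemma fwdF (xs : List Int) : ∀ (i j w mx : Int), j < i → 0 ≤ mx →
    (xs.foldl stepA (mx, (if w = 1 then i - j - 1 else 0), decide (w = 1))).1
      = (gapsD (-1) (pairsOf j w (marksAux i xs))).foldl max mx := by
  induction xs with
  | nil => intro i j w mx hji hmx; simp [marksAux, pairsOf, gapsD]
  | cons v t ih =>
      intro i j w mx hji hmx
      simp only [List.foldl_cons]
      by_cases h1 : v = 1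
      · subst h1
        rw [stepA_one, marksAux_cons_marker i 1 t (Or.inl rfl), pairsOf_cons,
          show ((mx, (if w = 1 then i - j - 1 else 0), decide (w = 1)).1) = mx from rfl]
        have := ih (i + 1) i 1 mx (by omega) hmx
        rw [if_pos rfl, show i + 1 - i - 1 = (0 : Int) by omega,
          show (decide ((1 : Int) = 1)) = true by decide] at this
        rw [this, gapsD]
        by_cases hw : w = -1
        · rw [if_pos hw]
          simp [gapsD, List.filter_cons]
        · rw [if_neg hw]
          simp [gapsD]
      · by_cases h2 : v = -1
        · subst h2
          rw [stepA_negone, marksAux_cons_marker i (-1) t (Or.inr rfl), pairsOf_cons]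
          have hrec := ih (i + 1) i (-1) (max (if w = 1 then i - j - 1 else 0) mx)
            (by omega) (le_trans hmx (le_max_right _ _))
          rw [if_neg (by norm_num : ¬ ((-1 : Int) = 1)),
            show (decide ((-1 : Int) = 1)) = false by decide] at hrec
          rw [show ((mx, (if w = 1 then i - j - 1 else 0), decide (w = 1)).2.1)
              = (if w = 1 then i - j - 1 else 0) from rfl,
            show ((mx, (if w = 1 then i - j - 1 else 0), decide (w = 1)).1) = mx from rfl, hrec]
          by_cases hw : w = 1
          · rw [if_pos hw, if_pos (by omega : w = -(-1)), List.singleton_append, gapsD_cons,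
              if_pos rfl, List.singleton_append, List.foldl_cons, foldl_max_pull]
            rw [max_comm mx, foldl_max_swap, max_comm (i - j - 1) mx]
          · rw [if_neg hw, if_neg (by omega : ¬ (w = -(-1))), List.nil_append,
              max_eq_right hmx]
        · have hm : ¬ (v = 1 ∨ v = -1) := by tauto
          rw [stepA_other _ v h1 h2, marksAux_cons_other i v t hm]
          by_cases hw : w = 1
          · rw [show ((mx, (if w = 1 then i - j - 1 else 0), decide (w = 1)).2.2)
                = decide (w = 1) from rfl]
            rw [hw, show (decide ((1 : Int) = 1)) = true by decide, if_pos rfl]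
            have := ih (i + 1) j 1 mx (by omega) hmx
            rw [if_pos rfl, show (decide ((1 : Int) = 1)) = true by decide] at this
            rw [← this, if_pos rfl]
            norm_num
            rw [show (i - j : Int) = i + 1 - j - 1 by omega]
          · rw [show ((mx, (if w = 1 then i - j - 1 else 0), decide (w = 1)).2.2)
                = decide (w = 1) from rfl]
            rw [show (decide (w = 1)) = false by simp [hw], if_neg (by simp)]
            have := ih (i + 1) j w mx (by omega) hmx
            rw [if_neg hw, show (decide (w = 1)) = false by simp [hw]] at this
            rw [← this, if_neg hw]

-- A's forward pass from its initial state
lemma fwd0 (xs : List Int) : ∀ (i mx : Int), 0 ≤ mx →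
    (xs.foldl stepA (mx, 0, false)).1
      = (gapsD (-1) (pairsStart (marksAux i xs))).foldl max mx := by
  induction xs with
  | nil => intro i mx hmx; simp [marksAux, pairsStart, gapsD]
  | cons v t ih =>
      intro i mx hmx
      simp only [List.foldl_cons]
      by_cases h1 : v = 1
      · subst h1
        rw [stepA_one, marksAux_cons_marker i 1 t (Or.inl rfl)]
        have := fwdF t (i + 1) i 1 mx (by omega) hmx
        rw [if_pos rfl, show i + 1 - i - 1 = (0 : Int) by omega,
          show (decide ((1 : Int) = 1)) = true by decide] at this
        exact this
      · by_cases h2 : v = -1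
        · subst h2
          rw [stepA_negone, marksAux_cons_marker i (-1) t (Or.inr rfl)]
          have := fwdF t (i + 1) i (-1) (max 0 mx) (by omega) (le_max_left 0 mx)
          rw [if_neg (by norm_num : ¬ ((-1 : Int) = 1)),
            show (decide ((-1 : Int) = 1)) = false by decide] at this
          simpa [pairsStart, max_eq_right hmx] using this
        · have hm : ¬ (v = 1 ∨ v = -1) := by tauto
          rw [stepA_other _ v h1 h2, marksAux_cons_other i v t hm, if_neg (by simp)]
          exact ih (i + 1) mx hmx

-- A's backward pass (a right fold over xs), fully characterised
lemma bwdF (xs : List Int) : ∀ (i mx : Int), 0 ≤ mx →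
    xs.foldr (fun v s => stepA s v) (mx, 0, false)
      = ((gapsD 1 (pairsStart (marksAux i xs))).foldl max mx,
         leadOf i (marksAux i xs), flagOf (marksAux i xs)) := by
  induction xs with
  | nil => intro i mx hmx; simp [marksAux, pairsStart, gapsD, leadOf, flagOf]
  | cons v t ih =>
      intro i mx hmx
      have hMt : mx ≤ (gapsD 1 (pairsStart (marksAux (i + 1) t))).foldl max mx :=
        (PySem.List.le_foldl_max _ _).1
      simp only [List.foldr_cons, ih (i + 1) mx hmx]
      by_cases h1 : v = 1
      · subst h1
        rw [stepA_one, marksAux_cons_marker i 1 t (Or.inl rfl)]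
        cases hms : marksAux (i + 1) t with
        | nil => simp [hms, pairsStart, pairsOf, leadOf, flagOf]
        | cons p ms' =>
            obtain ⟨k, h⟩ := p
            by_cases hh : h = -1
            · subst hh
              simp [pairsStart, pairsOf, leadOf, flagOf, gapsD_cons]
            · simp [pairsStart, pairsOf, leadOf, flagOf, show ¬ ((1 : Int) = -h) by omega]
      · by_cases h2 : v = -1
        · subst h2
          rw [stepA_negone, marksAux_cons_marker i (-1) t (Or.inr rfl)]
          cases hms : marksAux (i + 1) t with
          | nil => simp [hms, pairsStart, pairsOf, gapsD, leadOf, flagOf, max_eq_right hmx]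
          | cons p ms' =>
              obtain ⟨k, h⟩ := p
              rw [hms] at hMt
              by_cases hh : h = 1
              · subst hh
                refine Prod.ext ?_ (by simp [leadOf, flagOf])
                simp only [hms, pairsStart, pairsOf, leadOf, flagOf,
                  show ((-1 : Int) = -1) = True by norm_num, if_true, List.singleton_append,
                  gapsD_cons, if_pos rfl, List.foldl_cons, decide_eq_true_eq]
                rw [foldl_max_pull, show (k - i - 1 : Int) = k - (i + 1) by omega]
              · have hM0 : (0 : Int) ≤ (gapsD 1 (pairsOf k h ms')).foldl max mx :=
                  le_trans hmx (by simpa [pairsStart] using hMt)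
                simp [hms, pairsStart, pairsOf, leadOf, flagOf,
                  show ¬ ((-1 : Int) = -h) by omega, hh, max_eq_right hM0]
        · have hm : ¬ (v = 1 ∨ v = -1) := by tauto
          rw [stepA_other _ v h1 h2, marksAux_cons_other i v t hm]
          cases hms : marksAux (i + 1) t with
          | nil => simp [hms, leadOf, flagOf]
          | cons p ms' =>
              obtain ⟨k, h⟩ := p
              by_cases hh : h = 1
              · subst hh
                simp [hms, leadOf, flagOf]
                omega
              · simp [hms, leadOf, flagOf, hh]


-- B's pair loop over zip(marks, marks[1:]) with a first mark (j, w)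
lemma zipFold (ms : List (Int × Int)) : ∀ (j w b : Int),
    (List.zip ((j, w) :: ms) ms).foldl
        (fun b q => if q.1.2 = -q.2.2 then max b (q.2.1 - q.1.1 - 1) else b) b
      = ((pairsOf j w ms).map Prod.fst).foldl max b := by
  induction ms with
  | nil => intro j w b; simp [pairsOf]
  | cons p t ih =>
      intro j w b
      obtain ⟨k, h⟩ := p
      simp only [List.zip_cons_cons, List.foldl_cons, pairsOf]
      by_cases hw : w = -h
      · simp only [hw, if_pos rfl, List.singleton_append]
        exact ih k h _
      · simp only [if_neg hw, List.nil_append]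
        exact ih k h b

-- the two directional gap lists together are a permutation of all the gaps
lemma gaps_perm (P : List (Int × Int)) (hP : ∀ p ∈ P, p.2 = 1 ∨ p.2 = -1) :
    (gapsD (-1) P ++ gapsD 1 P).Perm (P.map Prod.fst) := by
  have hfil : P.filter (fun p => p.2 == 1) = P.filter (fun p => !(p.2 == (-1 : Int))) := by
    apply List.filter_congr
    intro p hp
    rcases hP p hp with h | h <;> simp [h]
  unfold gapsD
  rw [hfil, ← List.map_append]
  exact ((List.filter_append_perm _ P)).map Prod.fst

lemma foldl_max_perm {L1 L2 : List Int} (h : L1.Perm L2) (a : Int) :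
    L1.foldl max a = L2.foldl max a := by
  induction h generalizing a with
  | nil => rfl
  | cons x _ ih => simp only [List.foldl_cons]; exact ih _
  | swap x y l => simp only [List.foldl_cons, max_right_comm]
  | trans _ _ ih1 ih2 => rw [ih1, ih2]

-- ===== VERDICT (by name: the statement is the Claim_ definition above) =====
theorem captureFortsSelf_spec : Claim_equal_captureFortsSelf := by
  intro forts _
  unfold Spec_captureFortsSelf captureFortsSelf captureFortsSelf_alt
  rw [enum_filter_eq_marksAux forts 0]
  set ms := marksAux 0 forts with hms
  have hP : ∀ p ∈ pairsStart ms, p.2 = 1 ∨ p.2 = -1 := by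
    intro p hp
    cases hms' : ms with
    | nil => rw [hms'] at hp; simp [pairsStart] at hp
    | cons q t =>
        obtain ⟨k, h⟩ := q
        rw [hms'] at hp
        simp only [pairsStart] at hp
        obtain ⟨p', hp', he⟩ := pairsOf_mem t k h p hp
        rw [he]
        exact marksAux_mem forts 0 p' (by rw [← hms, hms']; exact List.mem_cons_of_mem _ hp')
  have hfwd : (forts.foldl stepA (0, 0, false)).1
      = (gapsD (-1) (pairsStart ms)).foldl max 0 := fwd0 forts 0 0 le_rfl
  have hfwd_nonneg : 0 ≤ (forts.foldl stepA (0, 0, false)).1 := by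
    rw [hfwd]; exact (PySem.List.le_foldl_max _ _).1
  have hbwd : forts.reverse.foldl stepA ((forts.foldl stepA (0, 0, false)).1, 0, false)
      = ((gapsD 1 (pairsStart ms)).foldl max ((forts.foldl stepA (0, 0, false)).1),
         leadOf 0 ms, flagOf ms) := by
    rw [List.foldl_reverse]
    exact bwdF forts 0 _ hfwd_nonneg
  simp only [hbwd]
  have hr : (gapsD 1 (pairsStart ms)).foldl max ((forts.foldl stepA (0, 0, false)).1)
      = ((pairsStart ms).map Prod.fst).foldl max 0 := by
    rw [hfwd, ← List.foldl_append]
    exact foldl_max_perm (gaps_perm _ hP) 0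
  rw [hr]
  have hrhs : (ms.zip (ms.drop 1)).foldl
      (fun b q => if q.1.2 = -q.2.2 then max b (q.2.1 - q.1.1 - 1) else b) 0
      = ((pairsStart ms).map Prod.fst).foldl max 0 := by
    cases ms with
    | nil => simp [pairsStart]
    | cons q t =>
        obtain ⟨j, w⟩ := q
        simp only [List.drop_one, List.tail_cons, pairsStart]
        exact zipFold t j w 0
  rw [hrhs]
  have hnn : 0 ≤ ((pairsStart ms).map Prod.fst).foldl max 0 := (PySem.List.le_foldl_max _ _).1
  by_cases hpos : ((pairsStart ms).map Prod.fst).foldl max 0 > 0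
  · rw [if_pos hpos]
  · rw [if_neg hpos]; omega
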